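-- pv_equiv track=rewrite | github.com/Otavioarp/BCC-701 | P-12-Vetores e Matrizes/q4m.py | pontuao
-- ===== SOURCE A (Python) =====
-- def pontuao( resultados):
--     tam = len(resultados)
--     vetor = criarVetor(tam , 0)
--     for i in range(tam):
--         for j in range(tam):
--             if resultados[i][j] == 1:
--                 vetor[i] += 3
--             elif resultados[i][j] == 2:
--                 vetor[j] += 3
--             elif resultados[i][j] == 0:
--                 vetor[i] += 1
--                 vetor[j] += 1
--     return vetor
--
-- def criarVetor(qtdElemntos , valorPadrao):
--     vetor = []
--     for i in range(qtdElemntos):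
--         vetor.append(valorPadrao)
--     return vetor
-- ===== SOURCE B (Python) =====
-- def pontuao(resultados):
--     n = len(resultados)
--     pontos = []
--     for k in range(n):
--         linha = resultados[k][:n]
--         coluna = [resultados[i][k] for i in range(n)]
--         pontos.append(3 * linha.count(1) + linha.count(0)
--                       + 3 * coluna.count(2) + coluna.count(0))
--     return pontos
-- ===== Notes on version B (the rewrite author's own statement) =====
-- stated objective: alternative
-- what changed: Per-player gather: each player's score is computed independently from counts of 1/0 in its row and 2/0 in its column, instead of one pass over all cells scattering points to two indices of a mutable vector.
import Mathlib
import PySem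

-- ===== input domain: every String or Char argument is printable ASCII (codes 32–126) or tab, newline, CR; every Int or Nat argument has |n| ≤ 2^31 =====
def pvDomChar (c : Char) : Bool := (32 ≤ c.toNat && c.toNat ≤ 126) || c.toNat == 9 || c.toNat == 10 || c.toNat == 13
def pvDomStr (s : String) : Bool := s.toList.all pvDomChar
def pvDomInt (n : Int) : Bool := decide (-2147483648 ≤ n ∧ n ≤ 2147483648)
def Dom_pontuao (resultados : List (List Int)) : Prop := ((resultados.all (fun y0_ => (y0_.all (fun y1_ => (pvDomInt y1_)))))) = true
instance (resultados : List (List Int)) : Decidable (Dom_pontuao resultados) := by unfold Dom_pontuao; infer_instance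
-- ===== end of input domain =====

-- B computes each player's score independently from row/column counts instead of
-- A's single scatter pass over all cells into a mutable vector.

-- ===== PORT A =====
-- criarVetor(qtd, valor): append `valor` qtd times
def criarVetor (qtd : Nat) (valor : Int) : List Int :=
  (List.range qtd).foldl (fun v _ => v ++ [valor]) []

-- vetor[i] += d  (i is always < vetor.length here)
def pvBump (v : List Int) (i : Nat) (d : Int) : List Int :=
  v.set i (v.getD i 0 + d)

-- resultados[i][j]; the default 3 is unreachable under Pre_pontuao
-- (an out-of-range j is an IndexError in Python, excluded by Pre_pontuao)
def pvCell (resultados : List (List Int)) (i j : Nat) : Int :=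
  (resultados.getD i []).getD j 3

def pvStep (resultados : List (List Int)) (v : List Int) (i j : Nat) : List Int :=
  if pvCell resultados i j = 1 then pvBump v i 3
  else if pvCell resultados i j = 2 then pvBump v j 3
  else if pvCell resultados i j = 0 then pvBump (pvBump v i 1) j 1
  else v

def pontuao (resultados : List (List Int)) : List Int :=
  let tam := resultados.length
  (List.range tam).foldl
    (fun v i => (List.range tam).foldl (fun v j => pvStep resultados v i j) v)
    (criarVetor tam 0)

-- ===== PORT B =====
def pontuao_alt (resultados : List (List Int)) : List Int :=
  let n := resultados.length
  (List.range n).map (fun k =>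
    let linha := (resultados.getD k []).take n
    let coluna := (List.range n).map (fun i => (resultados.getD i []).getD k 3)
    3 * (linha.count 1 : Int) + (linha.count 0 : Int)
      + 3 * (coluna.count 2 : Int) + (coluna.count 0 : Int))

-- ===== PRECONDITION & SPEC =====
-- Pre_: every row has at least `len(resultados)` entries — exactly the inputs on
-- which A's `resultados[i][j]` never raises IndexError.
def Pre_pontuao (resultados : List (List Int)) : Prop :=
  ∀ row ∈ resultados, resultados.length ≤ row.length
instance (resultados : List (List Int)) : Decidable (Pre_pontuao resultados) := by
  unfold Pre_pontuao; infer_instance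

def pvWitness_pontuao : List (List Int) := [[0, 1], [2, 0]]

def Spec_pontuao (resultados : List (List Int)) (out : List Int) : Prop := out = pontuao_alt resultados
instance (resultados : List (List Int)) (out : List Int) : Decidable (Spec_pontuao resultados out) := by unfold Spec_pontuao; infer_instance

-- ===== CLAIM (what is proved, stated in full; the proofs are below) =====
def Claim_equal_pontuao : Prop := ∀ (resultados : List (List Int)), Dom_pontuao resultados → Pre_pontuao resultados → Spec_pontuao resultados (pontuao resultados)

-- ===== LEMMAS AND PROOFS =====

-- contribution of cell (i,j) to player k's score
def pvDelta (resultados : List (List Int)) (i j k : Nat) : Int :=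
  (if i = k then
      (if pvCell resultados i j = 1 then 3
       else if pvCell resultados i j = 2 then 0
       else if pvCell resultados i j = 0 then 1 else 0)
   else 0)
  + (if j = k then
      (if pvCell resultados i j = 1 then 0
       else if pvCell resultados i j = 2 then 3
       else if pvCell resultados i j = 0 then 1 else 0)
     else 0)

theorem criarVetor_eq (q : Nat) (v : Int) : criarVetor q v = List.replicate q v := by
  unfold criarVetor
  induction q with
  | zero => simp
  | succ n ih =>
    rw [List.range_succ, List.foldl_append, ih, List.foldl_cons, List.foldl_nil,
        ← List.replicate_succ']

theorem pvBump_length (v : List Int) (i : Nat) (d : Int) :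
    (pvBump v i d).length = v.length := by simp [pvBump]

theorem pvStep_length (R : List (List Int)) (v : List Int) (i j : Nat) :
    (pvStep R v i j).length = v.length := by
  unfold pvStep; split_ifs <;> simp [pvBump_length]

theorem pvBump_getD (v : List Int) (i : Nat) (d : Int) (k : Nat) (hi : i < v.length) :
    (pvBump v i d).getD k 0 = v.getD k 0 + (if i = k then d else 0) := by
  unfold pvBump
  rcases eq_or_ne i k with rfl | h
  · rw [List.getD_eq_getElem?_getD, List.getElem?_set_self', List.getElem?_eq_getElem hi,
        List.getD_eq_getElem?_getD, List.getElem?_eq_getElem hi]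
    simp
  · simp [List.getD_eq_getElem?_getD, List.getElem?_set_ne h, h]

theorem pvStep_getD (R : List (List Int)) (v : List Int) (i j k : Nat)
    (hi : i < v.length) (hj : j < v.length) :
    (pvStep R v i j).getD k 0 = v.getD k 0 + pvDelta R i j k := by
  unfold pvStep
  split_ifs with h1 h2 h0
  · rw [pvBump_getD v i 3 k hi]; unfold pvDelta; split_ifs <;> simp_all <;> ring
  · rw [pvBump_getD v j 3 k hj]; unfold pvDelta; split_ifs <;> simp_all <;> ring
  · rw [pvBump_getD _ j 1 k (by rw [pvBump_length]; exact hj), pvBump_getD v i 1 k hi]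
    unfold pvDelta; split_ifs <;> simp_all <;> ring
  · unfold pvDelta; split_ifs <;> simp_all

theorem inner_length (R : List (List Int)) (i n : Nat) (v : List Int) :
    ((List.range n).foldl (fun v j => pvStep R v i j) v).length = v.length := by
  induction n with
  | zero => simp
  | succ m ih =>
    rw [List.range_succ, List.foldl_append, List.foldl_cons, List.foldl_nil,
        pvStep_length, ih]

theorem outer_length (R : List (List Int)) (n : Nat) (v : List Int) :
    ((List.range n).foldl
        (fun v i => (List.range R.length).foldl (fun v j => pvStep R v i j) v) v).length
      = v.length := by
  induction n with
  | zero => simp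
  | succ m ih =>
    rw [List.range_succ, List.foldl_append, List.foldl_cons, List.foldl_nil,
        inner_length, ih]

theorem inner_getD (R : List (List Int)) (i k n : Nat) (v : List Int)
    (hlen : v.length = R.length) (hn : n ≤ R.length) (hi : i < R.length)
    (hk : k < R.length) :
    ((List.range n).foldl (fun v j => pvStep R v i j) v).getD k 0
      = v.getD k 0 + ((List.range n).map (fun j => pvDelta R i j k)).sum := by
  induction n with
  | zero => simp
  | succ m ih =>
    rw [List.range_succ]
    simp only [List.foldl_append, List.foldl_cons, List.foldl_nil, List.map_append,
      List.map_cons, List.map_nil, List.sum_append, List.sum_cons, List.sum_nil]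
    rw [pvStep_getD R _ i m k (by rw [inner_length, hlen]; exact hi)
          (by rw [inner_length, hlen]; omega), ih (by omega)]
    ring

theorem outer_getD (R : List (List Int)) (k n : Nat) (v : List Int)
    (hlen : v.length = R.length) (hn : n ≤ R.length) (hk : k < R.length) :
    ((List.range n).foldl
        (fun v i => (List.range R.length).foldl (fun v j => pvStep R v i j) v) v).getD k 0
      = v.getD k 0
        + ((List.range n).map (fun i =>
            ((List.range R.length).map (fun j => pvDelta R i j k)).sum)).sum := by
  induction n with
  | zero => simp
  | succ m ih =>
    rw [List.range_succ]
    simp only [List.foldl_append, List.foldl_cons, List.foldl_nil, List.map_append,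
      List.map_cons, List.map_nil, List.sum_append, List.sum_cons, List.sum_nil]
    rw [inner_getD R m k R.length _ (by rw [outer_length, hlen]) le_rfl (by omega) hk,
        ih (by omega)]
    ring

-- the points cell (i,j) gives its row player / its column player
def pvRowTerm (R : List (List Int)) (i j : Nat) : Int :=
  (if pvCell R i j = 1 then 3 else 0) + (if pvCell R i j = 0 then 1 else 0)
def pvColTerm (R : List (List Int)) (i j : Nat) : Int :=
  (if pvCell R i j = 2 then 3 else 0) + (if pvCell R i j = 0 then 1 else 0)

theorem delta_split (R : List (List Int)) (i j k : Nat) :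
    pvDelta R i j k
      = (if i = k then pvRowTerm R i j else 0) + (if j = k then pvColTerm R i j else 0) := by
  unfold pvDelta pvRowTerm pvColTerm; split_ifs <;> simp_all <;> ring

theorem sum_map_add' (l : List Nat) (f g : Nat → Int) :
    (l.map (fun x => f x + g x)).sum = (l.map f).sum + (l.map g).sum := by
  induction l with
  | nil => simp
  | cons a t ih => simp [ih]; ring

theorem sum_ite_range (n k : Nat) (f : Nat → Int) (hk : k < n) :
    ((List.range n).map (fun i => if i = k then f i else 0)).sum = f k := by
  induction n with
  | zero => omega
  | succ m ih =>
    rw [List.range_succ]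
    simp only [List.map_append, List.map_cons, List.map_nil, List.sum_append,
      List.sum_cons, List.sum_nil]
    by_cases h : k = m
    · subst h
      have hz : ((List.range k).map (fun i => if i = k then f i else 0)).sum = 0 := by
        apply List.sum_eq_zero
        intro x hx
        simp only [List.mem_map, List.mem_range] at hx
        obtain ⟨i, hi, rfl⟩ := hx
        simp [Nat.ne_of_lt hi]
      simp [hz]
    · rw [ih (by omega), if_neg (fun hh => h hh.symm)]
      ring

theorem total_delta (R : List (List Int)) (k : Nat) (hk : k < R.length) :
    ((List.range R.length).map (fun i =>
        ((List.range R.length).map (fun j => pvDelta R i j k)).sum)).sum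
      = ((List.range R.length).map (fun j => pvRowTerm R k j)).sum
        + ((List.range R.length).map (fun i => pvColTerm R i k)).sum := by
  have hinner : ∀ i, ((List.range R.length).map (fun j => pvDelta R i j k)).sum
      = (if i = k then ((List.range R.length).map (fun j => pvRowTerm R i j)).sum else 0)
        + pvColTerm R i k := by
    intro i
    rw [show (fun j => pvDelta R i j k)
          = (fun j => (if i = k then pvRowTerm R i j else 0)
              + (if j = k then pvColTerm R i j else 0))
        from funext (fun j => delta_split R i j k)]
    rw [sum_map_add']
    congr 1
    · by_cases h : i = k <;> simp [h]
    · exact sum_ite_range _ _ _ hk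
  rw [show (fun i => ((List.range R.length).map (fun j => pvDelta R i j k)).sum)
        = (fun i => (if i = k
              then ((List.range R.length).map (fun j => pvRowTerm R i j)).sum else 0)
            + pvColTerm R i k)
      from funext hinner]
  rw [sum_map_add', sum_ite_range _ _ _ hk]

theorem count_sum_row (l : List Int) :
    ((l.map (fun x => (if x = 1 then (3:Int) else 0) + (if x = 0 then 1 else 0))).sum)
      = 3 * (l.count 1 : Int) + (l.count 0 : Int) := by
  induction l with
  | nil => simp
  | cons a t ih =>
    simp only [List.map_cons, List.sum_cons, List.count_cons, ih]
    split_ifs <;> simp_all <;> push_cast <;> ring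

theorem count_sum_col (l : List Int) :
    ((l.map (fun x => (if x = 2 then (3:Int) else 0) + (if x = 0 then 1 else 0))).sum)
      = 3 * (l.count 2 : Int) + (l.count 0 : Int) := by
  induction l with
  | nil => simp
  | cons a t ih =>
    simp only [List.map_cons, List.sum_cons, List.count_cons, ih]
    split_ifs <;> simp_all <;> push_cast <;> ring

theorem row_take (R : List (List Int)) (k : Nat) (hk : k < R.length)
    (hpre : Pre_pontuao R) :
    (((R.getD k []).take R.length).map
        (fun x => (if x = 1 then (3:Int) else 0) + (if x = 0 then 1 else 0)))
      = (List.range R.length).map (fun j => pvRowTerm R k j) := by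
  have hget : R.getD k [] = R[k] := by
    rw [List.getD_eq_getElem?_getD, List.getElem?_eq_getElem hk]; rfl
  have hrow : R.length ≤ (R.getD k []).length := by
    rw [hget]; exact hpre _ (List.getElem_mem hk)
  apply List.ext_getElem
  · simp only [List.length_map, List.length_take, List.length_range,
      List.getD_eq_getElem?_getD] at hrow ⊢
    omega
  · intro m h1 h2
    have hm : m < R.length := by simpa using h2
    have hm2 : m < (R.getD k []).length := by omega
    simp only [List.getElem_map, List.getElem_take, List.getElem_range]
    unfold pvRowTerm pvCell
    rw [List.getD_eq_getElem _ 3 hm2]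

theorem col_sum (R : List (List Int)) (k : Nat) :
    (((List.range R.length).map (fun i => (R.getD i []).getD k 3)).map
        (fun x => (if x = 2 then (3:Int) else 0) + (if x = 0 then 1 else 0))).sum
      = ((List.range R.length).map (fun i => pvColTerm R i k)).sum := by
  rw [List.map_map]; rfl

-- ===== VERDICT (by name: the statement is the Claim_ definition above) =====
theorem pontuao_spec : Claim_equal_pontuao := by
  intro R _ hpre
  unfold Spec_pontuao pontuao pontuao_alt
  simp only
  apply List.ext_getElem
  · rw [outer_length, criarVetor_eq]; simp
  · intro k h1 h2
    have hk : k < R.length := by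
      have := h1; rwa [outer_length, criarVetor_eq, List.length_replicate] at this
    rw [← List.getD_eq_getElem _ 0 h1, ← List.getD_eq_getElem _ 0 h2]
    rw [outer_getD R k R.length _ (by rw [criarVetor_eq]; simp) le_rfl hk,
        criarVetor_eq, total_delta R k hk]
    have hB : ((List.range R.length).map (fun k =>
        3 * (((R.getD k []).take R.length).count 1 : Int)
          + (((R.getD k []).take R.length).count 0 : Int)
          + 3 * ((((List.range R.length).map (fun i => (R.getD i []).getD k 3))).count 2 : Int)
          + ((((List.range R.length).map (fun i => (R.getD i []).getD k 3))).count 0 : Int))).getD k 0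
        = 3 * (((R.getD k []).take R.length).count 1 : Int)
          + (((R.getD k []).take R.length).count 0 : Int)
          + 3 * ((((List.range R.length).map (fun i => (R.getD i []).getD k 3))).count 2 : Int)
          + ((((List.range R.length).map (fun i => (R.getD i []).getD k 3))).count 0 : Int) := by
      rw [List.getD_eq_getElem _ 0 (by simpa using hk)]
      simp
    have hz : (List.replicate R.length (0:Int)).getD k 0 = 0 := by
      simp [List.getD_eq_getElem?_getD, List.getElem?_replicate, hk]
    rw [hB, hz, ← row_take R k hk hpre, count_sum_row, ← col_sum, count_sum_col]
    ring
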